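-- pv_equiv track=rewrite | github.com/RobertHan96/programmers_algorithm | LV.1/모의고사.py | solution
-- ===== SOURCE A (Python) =====
-- def solution(answers):
--     n = len(answers)
--     stu1 = [1, 2, 3, 4, 5] * n  # 학생1 배열
--     stu2 = [2, 1, 2, 3, 2, 4, 2, 5, ] * n  # 학생2 배열
--     stu3 = [3, 3, 1, 1, 2, 2, 4, 4, 5, 5] * n  # 학생3 배열
--     count = {1: 0, 2: 0, 3: 0}
--     for i in range(0, n):
--         if answers[i] == stu1[i]:
--             count[1] += 1
--         if answers[i] == stu2[i]:
--             count[2] += 1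
--         if answers[i] == stu3[i]:
--             count[3] += 1
--
--     return [key for key, value in count.items() if value > 0]
-- ===== SOURCE B (Python) =====
-- PATTERNS = {1: [1, 2, 3, 4, 5],
--             2: [2, 1, 2, 3, 2, 4, 2, 5],
--             3: [3, 3, 1, 1, 2, 2, 4, 4, 5, 5]}
--
--
-- def solution(answers):
--     # One histogram pass: count occurrences of each (position mod 40, value) pair
--     # (40 = lcm of the three pattern periods 5, 8, 10), then read each student's
--     # score off the histogram with 40 lookups — no per-pattern scan of answers.
--     hist = {}
--     for i, a in enumerate(answers):
--         key = (i % 40, a)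
--         hist[key] = hist.get(key, 0) + 1
--     return [k for k, p in PATTERNS.items()
--             if sum(hist.get((r, p[r % len(p)]), 0) for r in range(40)) > 0]
-- ===== Notes on version B (the rewrite author's own statement) =====
-- stated objective: alternative
-- what changed: Replaces the interleaved three-way comparison loop over materialised length-5n pattern arrays by one histogram pass counting (position mod 40, value) pairs (40 = lcm of the pattern periods), each student's score then being a 40-term lookup sum into the histogram; same >0 membership test and 1,2,3 order.
import Mathlib
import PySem

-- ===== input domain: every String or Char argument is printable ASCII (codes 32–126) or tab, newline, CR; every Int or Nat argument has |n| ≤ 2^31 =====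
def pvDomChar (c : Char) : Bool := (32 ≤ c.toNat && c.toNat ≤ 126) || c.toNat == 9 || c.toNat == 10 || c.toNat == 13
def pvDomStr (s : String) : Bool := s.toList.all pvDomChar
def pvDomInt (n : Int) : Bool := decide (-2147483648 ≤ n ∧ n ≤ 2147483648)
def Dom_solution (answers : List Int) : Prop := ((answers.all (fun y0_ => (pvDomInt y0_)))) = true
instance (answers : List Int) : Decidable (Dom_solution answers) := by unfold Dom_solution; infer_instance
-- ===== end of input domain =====

-- B replaces A's interleaved comparison loop over materialised length-5n pattern arrays by one
-- histogram pass over (position mod 40, value) pairs (40 = lcm of the pattern periods) followed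
-- by a 40-term lookup sum per student (objective: alternative; same return value on every input).

-- ===== PORT A =====
def solution (answers : List Int) : List Int :=
  let n := answers.length
  let stu1 := (List.replicate n ([1,2,3,4,5] : List Int)).flatten
  let stu2 := (List.replicate n ([2,1,2,3,2,4,2,5] : List Int)).flatten
  let stu3 := (List.replicate n ([3,3,1,1,2,2,4,4,5,5] : List Int)).flatten
  let count0 : PySem.Dict Int Int := ((PySem.Dict.empty.insert 1 0).insert 2 0).insert 3 0
  let count := (PySem.List.pyRange 0 (n:Int) 1).foldl (fun c i =>
    let c := if PySem.List.pyGetD answers i 0 = PySem.List.pyGetD stu1 i 0 then c.modify 1 0 (· + 1) else c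
    let c := if PySem.List.pyGetD answers i 0 = PySem.List.pyGetD stu2 i 0 then c.modify 2 0 (· + 1) else c
    if PySem.List.pyGetD answers i 0 = PySem.List.pyGetD stu3 i 0 then c.modify 3 0 (· + 1) else c) count0
  (count.items.filter (fun p => decide (0 < p.2))).map (·.1)

-- ===== PORT B =====
def pvPatterns : List (Int × List Int) :=
  [(1, [1,2,3,4,5]), (2, [2,1,2,3,2,4,2,5]), (3, [3,3,1,1,2,2,4,4,5,5])]

def solution_alt (answers : List Int) : List Int :=
  -- hist[key] = hist.get(key, 0) + 1 over key = (i % 40, a)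
  let hist : PySem.Dict (Int × Int) Int :=
    ((PySem.List.enumerate answers).map (fun ia => (PySem.Int.mod ia.1 40, ia.2))).foldl
      (fun d key => d.insert key (d.getD key 0 + 1)) PySem.Dict.empty
  (pvPatterns.filter (fun kp =>
      decide (0 < ((PySem.List.pyRange 0 40 1).map (fun r =>
        hist.getD (r, PySem.List.pyGetD kp.2 (PySem.Int.mod r (kp.2.length : Int)) 0) 0)).sum))).map (·.1)

-- ===== PRECONDITION & SPEC =====
def Spec_solution (answers : List Int) (out : List Int) : Prop := out = solution_alt answers
instance (answers : List Int) (out : List Int) : Decidable (Spec_solution answers out) := by unfold Spec_solution; infer_instance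

-- ===== CLAIM (what is proved, stated in full; the proofs are below) =====
def Claim_equal_solution : Prop := ∀ (answers : List Int), Dom_solution answers → Spec_solution answers (solution answers)

-- ===== LEMMAS AND PROOFS =====

-- A's loop over three conditional `count[k] += 1` updates of the literal dict {1,2,3} is a
-- per-key match counter.
lemma fold_three (P1 P2 P3 : Int → Prop) [DecidablePred P1] [DecidablePred P2] [DecidablePred P3] :
    ∀ (L : List Int) (a b c : Int),
      L.foldl (fun d i =>
          let d := if P1 i then d.modify 1 0 (· + 1) else d
          let d := if P2 i then d.modify 2 0 (· + 1) else d
          if P3 i then d.modify 3 0 (· + 1) else d)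
        (PySem.Dict.mk [((1:Int),a),(2,b),(3,c)])
      = PySem.Dict.mk [((1:Int), a + (L.countP (fun i => decide (P1 i)) : Int)),
                       (2, b + (L.countP (fun i => decide (P2 i)) : Int)),
                       (3, c + (L.countP (fun i => decide (P3 i)) : Int))] := by
  intro L
  induction L with
  | nil => intro a b c; simp
  | cons x L ih =>
    intro a b c
    rw [List.foldl_cons]
    have hstep : (let d := if P1 x then (PySem.Dict.mk [((1:Int),a),(2,b),(3,c)]).modify 1 0 (· + 1)
                           else PySem.Dict.mk [((1:Int),a),(2,b),(3,c)]
                  let d := if P2 x then d.modify 2 0 (· + 1) else d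
                  if P3 x then d.modify 3 0 (· + 1) else d)
        = PySem.Dict.mk [((1:Int), a + if P1 x then 1 else 0),
                         (2, b + if P2 x then 1 else 0),
                         (3, c + if P3 x then 1 else 0)] := by
      by_cases h1 : P1 x <;> by_cases h2 : P2 x <;> by_cases h3 : P3 x <;>
        simp [h1, h2, h3, PySem.Dict.modify, PySem.Dict.get?, PySem.Dict.getD, List.find?,
          PySem.Dict.insert, PySem.Dict.contains]
    rw [hstep, ih]
    simp only [List.countP_cons]
    by_cases h1 : P1 x <;> by_cases h2 : P2 x <;> by_cases h3 : P3 x <;>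
      simp [h1, h2, h3] <;> omega

-- A's stu arrays (pattern * n) read at i are the pattern read cyclically.
lemma getD_flatten_replicate (p : List Int) :
    ∀ (n i : Nat), i < n * p.length →
      ((List.replicate n p).flatten).getD i 0 = p.getD (i % p.length) 0 := by
  intro n
  induction n with
  | zero => intro i hi; omega
  | succ n ih =>
    intro i hi
    rw [List.replicate_succ, List.flatten_cons]
    by_cases h : i < p.length
    · rw [List.getD_append _ _ _ _ h, Nat.mod_eq_of_lt h]
    · have hle : p.length ≤ i := Nat.le_of_not_lt h
      rw [List.getD_append_right _ _ _ _ hle,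
        ih (i - p.length) (by simp only [Nat.succ_mul] at hi; omega)]
      congr 1
      conv_rhs => rw [← Nat.sub_add_cancel hle]
      rw [Nat.add_mod_right]

-- a sum of nonnegative Ints is positive iff some term is
lemma pv_sum_pos_iff : ∀ (l : List Int), (∀ x ∈ l, 0 ≤ x) → (0 < l.sum ↔ ∃ x ∈ l, 0 < x) := by
  intro l
  induction l with
  | nil => simp
  | cons x l ih =>
    intro h
    have hx : 0 ≤ x := h x (by simp)
    have hl : ∀ y ∈ l, 0 ≤ y := fun y hy => h y (by simp [hy])
    have hs : 0 ≤ l.sum := List.sum_nonneg hl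
    rw [List.sum_cons]
    constructor
    · intro hpos
      by_cases hx0 : 0 < x
      · exact ⟨x, by simp, hx0⟩
      · obtain ⟨y, hy, hy0⟩ := (ih hl).mp (by omega)
        exact ⟨y, by simp [hy], hy0⟩
    · rintro ⟨y, hy, hy0⟩
      rcases List.mem_cons.mp hy with rfl | hy
      · omega
      · have := (ih hl).mpr ⟨y, hy, hy0⟩; omega

-- Bridge: A's per-pattern match count is positive exactly when B's 40-term histogram sum is.
lemma count_pos_iff_sum_pos (answers pat : List Int) (hlen : 0 < pat.length)
    (hdvd : pat.length ∣ 40) :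
    (0 < ((PySem.List.pyRange 0 (answers.length : Int) 1).countP
        (fun i => decide (PySem.List.pyGetD answers i 0
          = PySem.List.pyGetD ((List.replicate answers.length pat).flatten) i 0))))
      ↔ 0 < ((PySem.List.pyRange 0 40 1).map (fun r =>
          (((PySem.List.enumerate answers).map (fun ia => (PySem.Int.mod ia.1 40, ia.2))).foldl
              (fun d key => d.insert key (d.getD key 0 + 1))
              (PySem.Dict.empty : PySem.Dict (Int × Int) Int)).getD
            (r, PySem.List.pyGetD pat (PySem.Int.mod r (pat.length : Int)) 0) 0)).sum := by
  rw [PySem.Dict.foldl_insert_getD_add_one_eq_counter]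
  have hmod40 : ∀ m : Nat, PySem.Int.mod (m : Int) 40 = ((m % 40 : Nat) : Int) := fun m => by
    exact_mod_cast PySem.Int.mod_natCast m 40
  set keyed := (PySem.List.enumerate answers).map (fun ia => (PySem.Int.mod ia.1 40, ia.2)) with hkeyed
  have hmemk : ∀ (r v : Int), (r, v) ∈ keyed ↔
      ∃ m : Nat, ∃ hm : m < answers.length, r = ((m % 40 : Nat) : Int) ∧ v = answers[m] := by
    intro r v
    rw [hkeyed, List.mem_map]
    constructor
    · rintro ⟨ia, hia, hev⟩
      rw [PySem.List.mem_enumerate_iff] at hia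
      obtain ⟨m, hm, rfl⟩ := hia
      simp only [zero_add, hmod40, Prod.mk.injEq] at hev
      exact ⟨m, hm, hev.1.symm, hev.2.symm⟩
    · rintro ⟨m, hm, rfl, rfl⟩
      refine ⟨((m : Int), answers[m]), ?_, ?_⟩
      · rw [PySem.List.mem_enumerate_iff]; exact ⟨m, hm, by simp⟩
      · simp only [hmod40]
  have hterm : ∀ r ∈ PySem.List.pyRange 0 40 1,
      (0:Int) ≤ (PySem.Dict.counter keyed).getD
        (r, PySem.List.pyGetD pat (PySem.Int.mod r (pat.length : Int)) 0) 0 := by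
    intro r _
    rw [PySem.Dict.getD_counter]
    positivity
  rw [pv_sum_pos_iff _ (by intro x hx; rw [List.mem_map] at hx; obtain ⟨r, hr, rfl⟩ := hx; exact hterm r hr)]
  rw [List.countP_pos_iff]
  constructor
  · rintro ⟨i, hi, hp⟩
    rw [PySem.List.mem_pyRange_one] at hi
    obtain ⟨h0, hn⟩ := hi
    lift i to Nat using h0 with m
    have hmn : m < answers.length := by exact_mod_cast hn
    simp only [PySem.List.pyGetD_natCast, decide_eq_true_eq] at hp
    rw [getD_flatten_replicate pat answers.length m (by nlinarith)] at hp
    refine ⟨_, List.mem_map.mpr ⟨((m % 40 : Nat) : Int), ?_, rfl⟩, ?_⟩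
    · rw [PySem.List.mem_pyRange_one]
      have : m % 40 < 40 := Nat.mod_lt _ (by norm_num)
      omega
    · rw [PySem.Dict.getD_counter]
      have hpr : PySem.List.pyGetD pat (PySem.Int.mod ((m % 40 : Nat) : Int) (pat.length : Int)) 0
          = answers[m] := by
        rw [PySem.Int.mod_natCast, PySem.List.pyGetD_natCast,
          Nat.mod_mod_of_dvd m hdvd, ← List.getD_eq_getElem answers 0 hmn]
        exact hp.symm
      rw [hpr]
      have hmem : (((m % 40 : Nat) : Int), answers[m]) ∈ keyed :=
        (hmemk _ _).mpr ⟨m, hmn, rfl, rfl⟩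
      have := List.count_pos_iff.mpr hmem
      exact_mod_cast this
  · rintro ⟨x, hx, hx0⟩
    rw [List.mem_map] at hx
    obtain ⟨r, hr, rfl⟩ := hx
    rw [PySem.Dict.getD_counter] at hx0
    have hmem : (r, PySem.List.pyGetD pat (PySem.Int.mod r (pat.length : Int)) 0) ∈ keyed :=
      List.count_pos_iff.mp (by exact_mod_cast hx0)
    obtain ⟨m, hmn, hr', hv⟩ := (hmemk _ _).mp hmem
    refine ⟨(m : Int), ?_, ?_⟩
    · rw [PySem.List.mem_pyRange_one]; omega
    · simp only [PySem.List.pyGetD_natCast, decide_eq_true_eq]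
      rw [getD_flatten_replicate pat answers.length m (by nlinarith),
        List.getD_eq_getElem answers 0 hmn, ← hv, hr', PySem.Int.mod_natCast,
        PySem.List.pyGetD_natCast, Nat.mod_mod_of_dvd m hdvd]

lemma solution_eq_alt (answers : List Int) : solution answers = solution_alt answers := by
  have hc0 : ((PySem.Dict.empty.insert (1:Int) (0:Int)).insert 2 0).insert 3 0
      = PySem.Dict.mk [((1:Int),(0:Int)),(2,0),(3,0)] := by decide
  simp only [solution]
  rw [hc0, fold_three
    (fun i => PySem.List.pyGetD answers i 0 = PySem.List.pyGetD ((List.replicate answers.length ([1,2,3,4,5] : List Int)).flatten) i 0)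
    (fun i => PySem.List.pyGetD answers i 0 = PySem.List.pyGetD ((List.replicate answers.length ([2,1,2,3,2,4,2,5] : List Int)).flatten) i 0)
    (fun i => PySem.List.pyGetD answers i 0 = PySem.List.pyGetD ((List.replicate answers.length ([3,3,1,1,2,2,4,4,5,5] : List Int)).flatten) i 0)]
  simp only [solution_alt, pvPatterns]
  have e1 := count_pos_iff_sum_pos answers [1,2,3,4,5] (by decide) (by decide)
  have e2 := count_pos_iff_sum_pos answers [2,1,2,3,2,4,2,5] (by decide) (by decide)
  have e3 := count_pos_iff_sum_pos answers [3,3,1,1,2,2,4,4,5,5] (by decide) (by decide)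
  set c1 := ((PySem.List.pyRange 0 (answers.length : Int) 1).countP
      (fun i => decide (PySem.List.pyGetD answers i 0
        = PySem.List.pyGetD ((List.replicate answers.length ([1,2,3,4,5] : List Int)).flatten) i 0))) with hcd1
  set c2 := ((PySem.List.pyRange 0 (answers.length : Int) 1).countP
      (fun i => decide (PySem.List.pyGetD answers i 0
        = PySem.List.pyGetD ((List.replicate answers.length ([2,1,2,3,2,4,2,5] : List Int)).flatten) i 0))) with hcd2
  set c3 := ((PySem.List.pyRange 0 (answers.length : Int) 1).countP
      (fun i => decide (PySem.List.pyGetD answers i 0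
        = PySem.List.pyGetD ((List.replicate answers.length ([3,3,1,1,2,2,4,4,5,5] : List Int)).flatten) i 0))) with hcd3
  set s1 := ((PySem.List.pyRange 0 40 1).map (fun r =>
      (((PySem.List.enumerate answers).map (fun ia => (PySem.Int.mod ia.1 40, ia.2))).foldl
          (fun d key => d.insert key (d.getD key 0 + 1))
          (PySem.Dict.empty : PySem.Dict (Int × Int) Int)).getD
        (r, PySem.List.pyGetD ([1,2,3,4,5] : List Int) (PySem.Int.mod r (([1,2,3,4,5] : List Int).length : Int)) 0) 0)).sum with hsd1
  set s2 := ((PySem.List.pyRange 0 40 1).map (fun r =>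
      (((PySem.List.enumerate answers).map (fun ia => (PySem.Int.mod ia.1 40, ia.2))).foldl
          (fun d key => d.insert key (d.getD key 0 + 1))
          (PySem.Dict.empty : PySem.Dict (Int × Int) Int)).getD
        (r, PySem.List.pyGetD ([2,1,2,3,2,4,2,5] : List Int) (PySem.Int.mod r (([2,1,2,3,2,4,2,5] : List Int).length : Int)) 0) 0)).sum with hsd2
  set s3 := ((PySem.List.pyRange 0 40 1).map (fun r =>
      (((PySem.List.enumerate answers).map (fun ia => (PySem.Int.mod ia.1 40, ia.2))).foldl
          (fun d key => d.insert key (d.getD key 0 + 1))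
          (PySem.Dict.empty : PySem.Dict (Int × Int) Int)).getD
        (r, PySem.List.pyGetD ([3,3,1,1,2,2,4,4,5,5] : List Int) (PySem.Int.mod r (([3,3,1,1,2,2,4,4,5,5] : List Int).length : Int)) 0) 0)).sum with hsd3
  have d1 : decide ((0:Int) < 0 + (c1 : Int)) = decide (0 < s1) := by
    rw [decide_eq_decide, zero_add, Int.natCast_pos]; exact e1
  have d2 : decide ((0:Int) < 0 + (c2 : Int)) = decide (0 < s2) := by
    rw [decide_eq_decide, zero_add, Int.natCast_pos]; exact e2
  have d3 : decide ((0:Int) < 0 + (c3 : Int)) = decide (0 < s3) := by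
    rw [decide_eq_decide, zero_add, Int.natCast_pos]; exact e3
  simp only [List.filter, d1, d2, d3]
  cases hb1 : decide (0 < s1) <;> cases hb2 : decide (0 < s2) <;> cases hb3 : decide (0 < s3) <;>
    simp only [List.map]

-- ===== VERDICT (by name: the statement is the Claim_ definition above) =====
theorem solution_spec : Claim_equal_solution := by
  intro answers _
  unfold Spec_solution
  exact solution_eq_alt answers
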